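-- pv_equiv track=rewrite | github.com/Pragith-C/Python | club_functions.py | get_clubs_of_club_persons
-- ===== SOURCE A (Python) =====
-- from typing import List, Tuple, Dict, TextIO
--
-- def update_dict(key: str, value: str,
--                 key_to_values: Dict[str, List[str]]) -> None:
--     """Update key_to_values with key/value. If key is in key_to_values,
--     and value is not already in the list associated with key,
--     append value to the list. Otherwise, add the pair key/[value] to
--     key_to_values.
--
--     >>> d = {'1': ['a', 'b']}
--     >>> update_dict('2', 'c', d)
--     >>> d == {'1': ['a', 'b'], '2': ['c']}
--     True
--     >>> update_dict('1', 'c', d)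
--     >>> d == {'1': ['a', 'b', 'c'], '2': ['c']}
--     True
--     >>> update_dict('1', 'c', d)
--     >>> d == {'1': ['a', 'b', 'c'], '2': ['c']}
--     True
--     """
--
--     if key not in key_to_values:
--         key_to_values[key] = []
--
--     if value not in key_to_values[key]:
--         key_to_values[key].append(value)
--
-- def get_clubs_of_club_persons(person_to_clubs: Dict[str, List[str]],
--                               person: str) -> List[str]:
--     """Return a list of all the clubs the people in person's club(s)
--     are apart of from person_to_clubs.
--
--     >>> get_clubs_of_club_persons (P2C, 'Danny R Tanner')
--     ['Rock N Rollers', 'Comics R Us']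
--
--     >>> get_clubs_of_club_persons (P2C, 'Rebecca Donaldson-Katsopolis')
--     []
--
--     """
--     clubs_to_person = invert_and_sort(person_to_clubs)
--     persons_in_clubs = []
--     in_club_person_clubs = []
--     if person in person_to_clubs:
--         person_clubs = person_to_clubs[person]
--     else:
--         person_clubs = []
--     for clubs in person_clubs:
--         for each_person in clubs_to_person[clubs]:
--             persons_in_clubs.append(each_person)
--     for each_person in persons_in_clubs:
--         if each_person in person_to_clubs:
--             for each_club in person_to_clubs[each_person]:
--                 if each_club not in person_clubs:
--                     in_club_person_clubs.append(each_club)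
--     return in_club_person_clubs
--
-- def invert_and_sort(key_to_value: Dict[object, object]) -> Dict[object, list]:
--     """Return key_to_value inverted so that each key is a value (for
--     non-list values) or an item from an iterable value, and each value
--     is a list of the corresponding keys from key_to_value.  The value
--     lists in the returned dict are sorted.
--
--     >>> invert_and_sort(P2C) == {
--     ...  'Comet Club': ['Michelle Tanner'],
--     ...  'Parent Council': ['Danny R Tanner', 'Jesse Katsopolis',
--     ...                     'Joey Gladstone'],
--     ...  'Rock N Rollers': ['Jesse Katsopolis', 'Kimmy Gibbler'],
--     ...  'Comics R Us': ['Joey Gladstone'],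
--     ...  'Smash Club': ['Kimmy Gibbler']}
--     True
--
--     >>> invert_and_sort({'Clare Dunphy': ['Phil Dunphy']}) == {
--     ...  'Phil Dunphy': ['Clare Dunphy']}
--     True
--
--     """
--     new_dic = {}
--     for key in key_to_value:
--         for element in key_to_value[key]:
--             update_dict(element, key, new_dic)
--
--     for key in new_dic:
--         new_dic[key].sort()
--
--     return new_dic
-- ===== SOURCE B (Python) =====
-- def get_clubs_of_club_persons(person_to_clubs, person):
--     """Clubs (other than person's own) of everyone sharing a club with person."""
--     person_clubs = person_to_clubs.get(person, [])
--     result = []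
--     for club in person_clubs:
--         for member in sorted(p for p in person_to_clubs if club in person_to_clubs[p]):
--             for c in person_to_clubs[member]:
--                 if c not in person_clubs:
--                     result.append(c)
--     return result
-- ===== Notes on version B (the rewrite author's own statement) =====
-- stated objective: faster
-- what changed: B drops the invert_and_sort dict inversion entirely: for each of person's clubs it computes the sorted member list by a direct filtered scan of the dict keys, and fuses A's two collection loops (collect persons, then collect their clubs) into a single pass that appends clubs immediately.
import Mathlib
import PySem

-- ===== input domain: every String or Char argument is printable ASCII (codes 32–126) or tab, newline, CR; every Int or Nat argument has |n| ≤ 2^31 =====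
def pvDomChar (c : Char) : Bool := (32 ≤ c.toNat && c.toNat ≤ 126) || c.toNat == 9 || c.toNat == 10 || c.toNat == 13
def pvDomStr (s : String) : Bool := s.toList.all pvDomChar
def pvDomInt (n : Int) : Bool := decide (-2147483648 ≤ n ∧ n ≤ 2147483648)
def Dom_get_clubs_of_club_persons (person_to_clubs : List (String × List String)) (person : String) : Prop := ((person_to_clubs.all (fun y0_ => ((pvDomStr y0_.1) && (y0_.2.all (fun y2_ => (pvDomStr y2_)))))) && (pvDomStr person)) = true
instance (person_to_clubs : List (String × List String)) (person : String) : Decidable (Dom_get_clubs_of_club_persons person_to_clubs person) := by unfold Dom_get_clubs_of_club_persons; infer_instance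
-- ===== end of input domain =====

-- B drops invert_and_sort: it finds each club's members by a direct sorted scan of the
-- dict keys and fuses A's two collection loops into one pass, doing work only for person's own clubs (objective: faster, measured).
-- Python's update_dict mutates its dict argument; the ports are value-passing, so the
-- equivalence proved here is about the RETURN value of get_clubs_of_club_persons.

-- ===== PORT A =====
def update_dict (key : String) (value : String) (key_to_values : PySem.Dict String (List String)) : PySem.Dict String (List String) :=
  let d := if key_to_values.contains key then key_to_values else key_to_values.insert key []
  if (d.getD key []).contains value then d else d.modify key [] (fun l => l ++ [value])

def invert_and_sort (key_to_value : PySem.Dict String (List String)) : PySem.Dict String (List String) :=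
  let new_dic := key_to_value.items.foldl
    (fun nd kv => kv.2.foldl (fun nd el => update_dict el kv.1 nd) nd) PySem.Dict.empty
  -- for key in new_dic: new_dic[key].sort()  (list.sort = stable sort, PySem.List.sorted)
  new_dic.keys.foldl (fun nd k => nd.modify k [] (fun l => PySem.List.sorted l (fun x => x) false)) new_dic

def get_clubs_of_club_persons (person_to_clubs : List (String × List String)) (person : String) : List String :=
  let p2c := PySem.Dict.ofList person_to_clubs
  let clubs_to_person := invert_and_sort p2c
  let person_clubs := if p2c.contains person then p2c.getD person [] else []
  -- clubs_to_person[clubs]: the key is always present (each club of person was inserted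
  -- by the inversion), so getD with default [] is exact here
  let persons_in_clubs := person_clubs.foldl
    (fun acc clubs => (clubs_to_person.getD clubs []).foldl (fun acc each_person => acc ++ [each_person]) acc) []
  persons_in_clubs.foldl
    (fun acc each_person =>
      if p2c.contains each_person then
        (p2c.getD each_person []).foldl
          (fun acc each_club => if person_clubs.contains each_club then acc else acc ++ [each_club]) acc
      else acc) []

-- ===== PORT B =====
def get_clubs_of_club_persons_alt (person_to_clubs : List (String × List String)) (person : String) : List String :=
  let p2c := PySem.Dict.ofList person_to_clubs
  let person_clubs := p2c.getD person []
  person_clubs.foldl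
    (fun res club =>
      (PySem.List.sorted (p2c.keys.filter (fun p => (p2c.getD p []).contains club)) (fun x => x) false).foldl
        (fun res member =>
          (p2c.getD member []).foldl
            (fun res c => if person_clubs.contains c then res else res ++ [c]) res)
        res)
    []

-- ===== PRECONDITION & SPEC =====
def Spec_get_clubs_of_club_persons (person_to_clubs : List (String × List String)) (person : String) (out : List String) : Prop := out = get_clubs_of_club_persons_alt person_to_clubs person
instance (person_to_clubs : List (String × List String)) (person : String) (out : List String) : Decidable (Spec_get_clubs_of_club_persons person_to_clubs person out) := by unfold Spec_get_clubs_of_club_persons; infer_instance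

-- ===== CLAIM (what is proved, stated in full; the proofs are below) =====
def Claim_equal_get_clubs_of_club_persons : Prop := ∀ (person_to_clubs : List (String × List String)) (person : String), Dom_get_clubs_of_club_persons person_to_clubs person → Spec_get_clubs_of_club_persons person_to_clubs person (get_clubs_of_club_persons person_to_clubs person)

-- ===== LEMMAS AND PROOFS =====

theorem getD_update_dict_self (k v : String) (d : PySem.Dict String (List String)) :
    (update_dict k v d).getD k [] =
      if (d.getD k []).contains v then d.getD k [] else d.getD k [] ++ [v] := by
  unfold update_dict
  by_cases hc : d.contains k
  · by_cases hv : v ∈ d.getD k []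
    · simp [hc, hv]
    · simp [hc, hv, PySem.Dict.getD_modify_self]
  · have h0 : d.getD k [] = [] :=
      PySem.Dict.getD_of_not_contains d [] (by simpa using hc)
    simp [hc, h0, PySem.Dict.getD_insert_self, PySem.Dict.getD_modify_self]

theorem getD_update_dict_ne (k v c : String) (d : PySem.Dict String (List String)) (h : c ≠ k) :
    (update_dict k v d).getD c [] = d.getD c [] := by
  unfold update_dict
  by_cases hc : d.contains k
  · by_cases hv : v ∈ d.getD k []
    · simp [hc, hv]
    · simp [hc, hv, PySem.Dict.getD_modify_of_ne d [] _ h]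
  · have h0 : (d.insert k []).getD k [] = [] := PySem.Dict.getD_insert_self d k [] []
    simp [hc, h0, PySem.Dict.getD_modify_of_ne _ [] _ h, PySem.Dict.getD_insert_of_ne d [] [] h]

theorem inner_fold (els : List String) (k c : String) (d : PySem.Dict String (List String)) :
    ((els.foldl (fun nd el => update_dict el k nd) d).getD c []) =
      if els.contains c && !((d.getD c []).contains k) then d.getD c [] ++ [k] else d.getD c [] := by
  induction els generalizing d with
  | nil => simp
  | cons el els ih =>
    simp only [List.foldl_cons, ih, List.contains_cons]
    by_cases hec : el = c
    · subst hec
      by_cases hk : k ∈ d.getD el []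
      · rw [getD_update_dict_self]
        simp [hk]
      · rw [getD_update_dict_self]
        simp [hk]
    · rw [getD_update_dict_ne el k c d (Ne.symm hec)]
      have h2 : ¬ c = el := fun e => hec e.symm
      simp [h2]

theorem outer_fold (items : List (String × List String)) (c : String) (d : PySem.Dict String (List String))
    (hfresh : ∀ kv ∈ items, (d.getD c []).contains kv.1 = false)
    (hnd : (items.map Prod.fst).Nodup) :
    ((items.foldl (fun nd kv => kv.2.foldl (fun nd el => update_dict el kv.1 nd) nd) d).getD c []) =
      d.getD c [] ++ (items.filter (fun kv => kv.2.contains c)).map Prod.fst := by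
  induction items generalizing d with
  | nil => simp
  | cons kv items ih =>
    simp only [List.foldl_cons]
    have hkv : (d.getD c []).contains kv.1 = false := hfresh kv (by simp)
    have hd' : ((kv.2.foldl (fun nd el => update_dict el kv.1 nd) d).getD c []) =
        if kv.2.contains c then d.getD c [] ++ [kv.1] else d.getD c [] := by
      have hkv' : kv.1 ∉ d.getD c [] := by simpa using hkv
      rw [inner_fold]; simp [hkv']
    rw [ih]
    · by_cases hcc : c ∈ kv.2 <;> simp [hd', hcc]
    · intro p hp
      have hne : p.1 ≠ kv.1 := by
        simp only [List.map_cons, List.nodup_cons] at hnd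
        exact fun e => hnd.1 (e ▸ List.mem_map_of_mem hp)
      have hfr := hfresh p (by simp [hp])
      rw [hd']
      by_cases hcc : c ∈ kv.2 <;> simp_all
    · simpa using hnd.sublist (by simp)

theorem sort_fold (ks : List String) (c : String) (m : PySem.Dict String (List String)) :
    ((ks.foldl (fun nd k => nd.modify k [] (fun l => PySem.List.sorted l (fun x => x) false)) m).getD c []) =
      if ks.contains c then PySem.List.sorted (m.getD c []) (fun x => x) false else m.getD c [] := by
  induction ks generalizing m with
  | nil => simp
  | cons k ks ih =>
    simp only [List.foldl_cons, ih]
    by_cases hkc : k = c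
    · subst hkc
      simp [PySem.Dict.getD_modify_self, PySem.List.sorted_sorted]
    · have h2 : ¬ c = k := fun e => hkc e.symm
      rw [PySem.Dict.getD_modify_of_ne m [] _ h2]
      simp [h2]

theorem invert_getD (d : PySem.Dict String (List String)) (hnd : d.keys.Nodup) (c : String) :
    (invert_and_sort d).getD c [] =
      PySem.List.sorted ((d.items.filter (fun kv => kv.2.contains c)).map Prod.fst) (fun x => x) false := by
  unfold invert_and_sort
  have hnd' : (d.items.map Prod.fst).Nodup := hnd
  have hbase := outer_fold d.items c PySem.Dict.empty (by simp [PySem.Dict.getD_empty]) hnd'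
  simp only [PySem.Dict.getD_empty, List.nil_append] at hbase
  rw [sort_fold]
  by_cases hc : c ∈ (d.items.foldl (fun nd kv => kv.2.foldl (fun nd el => update_dict el kv.1 nd) nd) PySem.Dict.empty).keys
  · rw [if_pos (by simpa using hc), hbase]
  · rw [if_neg (by simpa using hc)]
    have hz : (d.items.foldl (fun nd kv => kv.2.foldl (fun nd el => update_dict el kv.1 nd) nd) PySem.Dict.empty).getD c [] = [] := by
      apply PySem.Dict.getD_of_not_contains
      rw [PySem.Dict.contains_eq_decide_mem_keys]
      simpa using hc
    rw [hz] at hbase ⊢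
    rw [← hbase]
    rfl

theorem members_eq (xs : List (String × List String)) (c : String) :
    (PySem.Dict.ofList xs).keys.filter (fun p => ((PySem.Dict.ofList xs).getD p []).contains c) =
      ((PySem.Dict.ofList xs).items.filter (fun kv => kv.2.contains c)).map Prod.fst := by
  have hkeys : (PySem.Dict.ofList xs).keys = (PySem.Dict.ofList xs).items.map Prod.fst := rfl
  rw [hkeys, List.filter_map]
  congr 1
  apply List.filter_congr
  intro kv hkv
  have := PySem.Dict.getD_of_mem_items (PySem.Dict.ofList xs)
    (k := kv.1) (v := kv.2) (by simpa using hkv) (PySem.Dict.nodup_keys_ofList xs) []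
  simp [Function.comp, this]

theorem foldl_concat {α β σ : Type} (l : List α) (m : α → List β) (g : σ → β → σ) (init : List β) (s : σ) :
    (l.foldl (fun a c => a ++ m c) init).foldl g s = l.foldl (fun s c => (m c).foldl g s) (init.foldl g s) := by
  induction l generalizing init s with
  | nil => rfl
  | cons c l ih =>
    simp only [List.foldl_cons, ih, List.foldl_append]

theorem main_eq (xs : List (String × List String)) (person : String) :
    get_clubs_of_club_persons xs person = get_clubs_of_club_persons_alt xs person := by
  unfold get_clubs_of_club_persons get_clubs_of_club_persons_alt
  have hpc : (if (PySem.Dict.ofList xs).contains person then (PySem.Dict.ofList xs).getD person [] else []) =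
      (PySem.Dict.ofList xs).getD person [] := by
    by_cases h : (PySem.Dict.ofList xs).contains person
    · simp [h]
    · simp [h, PySem.Dict.getD_of_not_contains (PySem.Dict.ofList xs) ([] : List String) (by simpa using h)]
  simp only [hpc, PySem.List.foldl_append_singleton]
  rw [foldl_concat]
  apply PySem.List.foldl_congr_mem
  intro s club _
  rw [invert_getD _ (PySem.Dict.nodup_keys_ofList xs) club, ← members_eq]
  apply PySem.List.foldl_congr_mem
  intro acc p hp
  have hpk : p ∈ (PySem.Dict.ofList xs).keys := by
    rw [PySem.List.mem_sorted] at hp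
    exact (List.mem_filter.mp hp).1
  rw [if_pos ((PySem.Dict.contains_iff_mem_keys _ _).mpr hpk)]

-- ===== VERDICT (by name: the statement is the Claim_ definition above) =====
theorem get_clubs_of_club_persons_spec : Claim_equal_get_clubs_of_club_persons := by
  intro xs person _
  unfold Spec_get_clubs_of_club_persons
  exact main_eq xs person
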